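-- pv_equiv track=rewrite | github.com/jakeyboy1273/Oscilloscope-Capturer | Graph.py | place_format
-- ===== SOURCE A (Python) =====
-- def place_format(narray, index):
--     """Calculate where on the fig array a particular series should go"""
--
--     # place = [row, column, index]
--     place = [0, 0, 0]
--     while place[2] < index:
--         # increment row, and check
--         place[0] += 1
--         place[1] = 1
--         place[2] = (place[0] - 1) * narray[1] + place[1]
--         # increment column, and check
--         while place[2] < index and place[1] < narray[1]:
--             place[1] += 1
--             place[2] = (place[0] - 1) * narray[1] + place[1]
--     return place
-- ===== SOURCE B (Python) =====
-- def place_format(narray, index):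
--     """Calculate where on the fig array a particular series should go"""
--     if index <= 0:
--         return [0, 0, 0]
--     row, col = divmod(index - 1, narray[1])
--     return [row + 1, col + 1, index]
-- ===== Notes on version B (the rewrite author's own statement) =====
-- stated objective: simpler
-- what changed: Replaces the nested row/column counting loops with a single closed-form divmod on index-1.
-- outside the precondition, e.g. on place_format([2, 0], 1): A returns [1, 1, 1], B raises ZeroDivisionError
import Mathlib
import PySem

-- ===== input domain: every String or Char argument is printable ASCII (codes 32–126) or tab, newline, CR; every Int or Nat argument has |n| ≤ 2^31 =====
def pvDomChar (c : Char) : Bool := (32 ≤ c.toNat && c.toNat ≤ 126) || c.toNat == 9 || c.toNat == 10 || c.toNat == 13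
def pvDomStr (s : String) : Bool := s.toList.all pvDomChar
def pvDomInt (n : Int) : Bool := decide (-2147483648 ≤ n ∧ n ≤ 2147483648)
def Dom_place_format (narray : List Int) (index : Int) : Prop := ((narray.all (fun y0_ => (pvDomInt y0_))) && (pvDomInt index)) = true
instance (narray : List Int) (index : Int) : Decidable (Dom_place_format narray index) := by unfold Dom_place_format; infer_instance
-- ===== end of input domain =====

-- B replaces A's nested row/column counting loops by a single closed-form divmod on index-1.


-- ===== PORT A =====
-- inner 'while place[2] < index and place[1] < narray[1]' loop; state = (col, p2)
def pfInner (index cols row col p2 : Int) : Int × Int :=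
  if _h : p2 < index ∧ col < cols then
    pfInner index cols row (col + 1) ((row - 1) * cols + (col + 1))
  else (col, p2)
termination_by (cols - col).toNat
decreasing_by omega

-- outer 'while place[2] < index' loop; fuel makes it total (A diverges when cols ≤ 0
-- and index > 1, which Pre_ excludes); under Pre_ the fuel is never exhausted.
def pfOuter (index cols : Int) (fuel : Nat) (row col p2 : Int) : List Int :=
  match fuel with
  | 0 => [row, col, p2]
  | fuel + 1 =>
    if p2 < index then
      let row' := row + 1
      let p2' := (row' - 1) * cols + 1
      let s := pfInner index cols row' 1 p2'
      pfOuter index cols fuel row' s.1 s.2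
    else [row, col, p2]

def place_format (narray : List Int) (index : Int) : List Int :=
  -- Python reads narray[1] only inside the loop; IndexError (len < 2, index > 0) is excluded by Pre_
  let cols := (PySem.List.pyGet? narray 1).getD 0
  pfOuter index cols (index.toNat + 1) 0 0 0

-- ===== PORT B =====
def place_format_alt (narray : List Int) (index : Int) : List Int :=
  if index ≤ 0 then [0, 0, 0]
  else
    let cols := (PySem.List.pyGet? narray 1).getD 0
    match PySem.Int.divmod? (index - 1) cols with
    | some (q, r) => [q + 1, r + 1, index]
    | none => []  -- ZeroDivisionError (cols = 0); outside Pre_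

-- ===== PRECONDITION & SPEC =====
-- Pre_ excludes: index > 0 with len(narray) < 2 (A raises IndexError); index > 1 with
-- narray[1] ≤ 0 (A loops forever); and the corner index = 1 with narray[1] = 0, where A
-- returns [1,1,1] but B's divmod raises ZeroDivisionError.
def Pre_place_format (narray : List Int) (index : Int) : Prop :=
  index ≤ 0 ∨ (2 ≤ narray.length ∧ (1 ≤ narray[1]! ∨ (index = 1 ∧ narray[1]! < 0)))
instance (narray : List Int) (index : Int) : Decidable (Pre_place_format narray index) := by
  unfold Pre_place_format; infer_instance

def pvWitness_place_format : List Int × Int := ([2, 3], 5)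

def Spec_place_format (narray : List Int) (index : Int) (out : List Int) : Prop := out = place_format_alt narray index
instance (narray : List Int) (index : Int) (out : List Int) : Decidable (Spec_place_format narray index out) := by unfold Spec_place_format; infer_instance

-- ===== CLAIM (what is proved, stated in full; the proofs are below) =====
def Claim_equal_place_format : Prop := ∀ (narray : List Int) (index : Int), Dom_place_format narray index → Pre_place_format narray index → Spec_place_format narray index (place_format narray index)

-- ===== LEMMAS AND PROOFS =====

lemma pfInner_eq (index cols row : Int) :
    ∀ (n : Nat) (col : Int), (cols - col).toNat = n → col ≤ cols →
    pfInner index cols row col ((row - 1) * cols + col) =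
      (max col (min cols (index - (row - 1) * cols)),
       (row - 1) * cols + max col (min cols (index - (row - 1) * cols))) := by
  intro n
  induction n with
  | zero =>
    intro col hn hle
    have hcol : col = cols := by omega
    subst hcol
    rw [pfInner, dif_neg (by omega)]
    congr 1 <;> omega
  | succ n ih =>
    intro col hn hle
    rw [pfInner]
    by_cases h : (row - 1) * cols + col < index ∧ col < cols
    · rw [dif_pos h]
      rw [ih (col + 1) (by omega) (by omega)]
      congr 1 <;> omega
    · rw [dif_neg h]
      congr 1 <;> omega

lemma pfOuter_stop (index cols : Int) (fuel : Nat) (row col p2 : Int)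
    (h : ¬ p2 < index) : pfOuter index cols fuel row col p2 = [row, col, p2] := by
  cases fuel <;> simp [pfOuter, h]

lemma pfOuter_eq (index cols : Int) (hc : 1 ≤ cols) :
    ∀ (fuel : Nat) (row col p2 : Int), 0 ≤ row → row * cols < index → p2 < index →
    index ≤ row * cols + fuel →
    pfOuter index cols fuel row col p2 =
      [PySem.Int.floordiv (index - 1) cols + 1, PySem.Int.mod (index - 1) cols + 1, index] := by
  intro fuel
  induction fuel with
  | zero => intro row col p2 _ h1 _ h3; omega
  | succ fuel ih =>
    intro row col p2 hr h1 h2 h3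
    rw [pfOuter, if_pos h2]
    have hrw : row + 1 - 1 = row := by ring
    simp only [hrw]
    have hx : 1 ≤ index - row * cols := by omega
    have hinner := pfInner_eq index cols (row + 1) (cols - 1).toNat 1 rfl (by omega)
    simp only [hrw] at hinner
    rw [hinner]
    by_cases hcase : index - row * cols ≤ cols
    · -- the inner loop reached position index: the outer test fails and the loop ends
      have hmax : max 1 (min cols (index - row * cols)) = index - row * cols := by omega
      rw [hmax]
      rw [pfOuter_stop index cols fuel (row + 1) (index - row * cols)
        (row * cols + (index - row * cols)) (by omega)]
      have hq : PySem.Int.floordiv (index - 1) cols = row := by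
        rw [PySem.Int.floordiv_eq_iff_of_pos (by omega)]
        constructor
        · nlinarith
        · nlinarith
      have hm : PySem.Int.mod (index - 1) cols = index - 1 - row * cols := by
        have h := PySem.Int.floordiv_mul_add_mod (index - 1) cols
        rw [hq] at h; nlinarith
      rw [hq, hm]
      simp only [List.cons.injEq, and_true]
      exact ⟨trivial, by omega, by omega⟩
    · -- column saturated at cols: continue with the next row
      have hmax : max 1 (min cols (index - row * cols)) = cols := by omega
      rw [hmax]
      have hmul : (row + 1) * cols = row * cols + cols := by ring
      have := ih (row + 1) cols (row * cols + cols) (by omega)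
        (by omega) (by omega) (by rw [hmul]; omega)
      exact this

-- ===== VERDICT (by name: the statement is the Claim_ definition above) =====
theorem place_format_spec : Claim_equal_place_format := by
  intro narray index _hd hpre
  unfold Spec_place_format place_format place_format_alt
  by_cases hidx : index ≤ 0
  · have hf : index.toNat + 1 = 0 + 1 := by omega
    rw [hf, pfOuter, if_neg (by omega), if_pos hidx]
  · rw [if_neg hidx]
    rcases hpre with h | ⟨hlen, hc⟩
    · omega
    have hlt : (1 : Int) < (narray.length : Int) := by exact_mod_cast hlen
    have hbang : narray[1]! = narray[(1:Int).toNat] := by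
      rw [getElem!_pos narray 1 (by omega)]
      rfl
    have hget : PySem.List.pyGet? narray 1 = some narray[1]! := by
      rw [PySem.List.pyGet?_eq_some_getElem narray (by omega) hlt, hbang]
      rfl
    rw [hget]
    simp only [Option.getD_some]
    rw [← hbang] at *
    set cols := narray[1]! with hcols
    rcases hc with hc1 | ⟨hi1, hcneg⟩
    · have hne : cols ≠ 0 := by omega
      have hdm : PySem.Int.divmod? (index - 1) cols =
          some (PySem.Int.floordiv (index - 1) cols, PySem.Int.mod (index - 1) cols) := by
        simp [PySem.Int.divmod?, PySem.Int.floordiv, PySem.Int.mod, hne]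
      rw [hdm]
      have h0 : (0 : Int) * cols = 0 := by ring
      exact pfOuter_eq index cols hc1 (index.toNat + 1) 0 0 0 le_rfl
        (by rw [h0]; omega) (by omega) (by rw [h0]; push_cast; omega)
    · -- index = 1 with cols < 0: one outer iteration, the inner loop exits at once
      subst hi1
      have hne : cols ≠ 0 := by omega
      have hdm : PySem.Int.divmod? (1 - 1) cols = some (0, 0) := by
        norm_num [PySem.Int.divmod?, hne]
      rw [hdm]
      rw [show (1:Int).toNat + 1 = 1 + 1 from rfl]
      rw [pfOuter, if_pos (by omega : (0:Int) < 1)]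
      simp only [show ((0:Int) + 1 - 1) * cols + 1 = 1 from by ring]
      rw [pfInner, dif_neg (by omega)]
      rw [pfOuter_stop 1 cols 1 (0 + 1) ((1:Int), (1:Int)).1 ((1:Int), (1:Int)).2 (by norm_num)]
      norm_num
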